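-- pv_equiv track=rewrite | github.com/DhruvMarulkar/Drunken_Bishop | drunken_bishop/core.py | generate_walk
-- ===== SOURCE A (Python) =====
-- def generate_walk(bits, width, height):
--     """Generate drunken bishop walk grid."""
--     moves = {
--         "00": (-1, -1),
--         "01": (1, -1),
--         "10": (-1, 1),
--         "11": (1, 1)
--     }
--
--     grid = [[0 for _ in range(width)] for _ in range(height)]
--
--     x = width // 2
--     y = height // 2
--     start = (x, y)
--
--     for i in range(0, len(bits), 2):
--         step = bits[i:i + 2]
--         if len(step) < 2:
--             break
--
--         dx, dy = moves[step]
--         x = max(0, min(width - 1, x + dx))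
--         y = max(0, min(height - 1, y + dy))
--         grid[y][x] += 1
--
--     end = (x, y)
--     return grid, start, end
-- ===== SOURCE B (Python) =====
-- def generate_walk(bits, width, height):
--     """Generate drunken bishop walk grid (count-then-build decomposition)."""
--     moves = {
--         "00": (-1, -1),
--         "01": (1, -1),
--         "10": (-1, 1),
--         "11": (1, 1)
--     }
--
--     # First pass: decode the full bit pairs into deltas (a trailing odd bit is dropped).
--     deltas = [moves[bits[i:i + 2]] for i in range(0, len(bits) - 1, 2)]
--
--     x = width // 2
--     y = height // 2
--     start = (x, y)
--
--     # Second pass: walk, recording each clamped position.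
--     path = []
--     for dx, dy in deltas:
--         x = max(0, min(width - 1, x + dx))
--         y = max(0, min(height - 1, y + dy))
--         path.append((x, y))
--
--     # Count the visits per cell, then build the grid from the counts.
--     counts = {}
--     for p in path:
--         counts[p] = counts.get(p, 0) + 1
--     grid = [[counts.get((cx, cy), 0) for cx in range(width)] for cy in range(height)]
--
--     end = path[-1] if path else start
--     return grid, start, end
-- ===== Notes on version B (the rewrite author's own statement) =====
-- stated objective: alternative
-- what changed: A mutates a preallocated grid cell by cell while walking; B decomposes the task into decode-bit-pairs, walk-recording-a-trajectory, count visits per cell in a dict, and build the grid in one comprehension from the counts (the end position read off the trajectory instead of loop state).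
import Mathlib
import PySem

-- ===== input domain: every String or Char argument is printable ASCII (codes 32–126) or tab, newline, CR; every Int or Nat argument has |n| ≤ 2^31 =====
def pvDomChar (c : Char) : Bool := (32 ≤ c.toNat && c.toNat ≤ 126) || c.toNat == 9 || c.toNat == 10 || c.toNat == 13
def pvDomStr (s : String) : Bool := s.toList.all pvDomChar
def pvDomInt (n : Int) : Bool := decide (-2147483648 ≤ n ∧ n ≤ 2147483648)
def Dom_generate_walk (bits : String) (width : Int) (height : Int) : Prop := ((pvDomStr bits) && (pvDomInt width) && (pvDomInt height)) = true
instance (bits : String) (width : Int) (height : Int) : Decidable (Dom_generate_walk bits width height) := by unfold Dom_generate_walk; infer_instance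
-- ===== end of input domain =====

-- B decomposes A's single mutate-as-you-walk loop into decode-pairs / walk-recording-a-path / count-visits /
-- build-grid-from-counts; same return value on Pre_ (objective: alternative decomposition, no speed claim).

-- ===== PORT A =====
-- the moves dict (shared literal of both Pythons)
def pvMoves : PySem.Dict String (Int × Int) :=
  ((((PySem.Dict.empty).insert "00" (-1, -1)).insert "01" (1, -1)).insert "10" (-1, 1)).insert "11" (1, 1)

-- grid[y][x] += 1 ; at every call site y,x are results of 'max 0 …', so .toNat is exact here
def pvGridInc (grid : List (List Int)) (y x : Int) : List (List Int) :=
  grid.modify y.toNat (fun row => row.modify x.toNat (· + 1))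

-- A's for-loop over range(0, len(bits), 2) with its break; state (grid, x, y);
-- moves[step] resolved with default (0,0): a KeyError input is excluded by Pre_
def pvLoopA (bl : List Char) (width height : Int) :
    List Int → List (List Int) × Int × Int → List (List Int) × Int × Int
  | [], st => st
  | i :: rest, st =>
    let step := PySem.List.slice bl (some i) (some (i + 2))
    if step.length < 2 then st
    else
      let d := pvMoves.getD (String.ofList step) (0, 0)
      let x' := max 0 (min (width - 1) (st.2.1 + d.1))
      let y' := max 0 (min (height - 1) (st.2.2 + d.2))
      pvLoopA bl width height rest (pvGridInc st.1 y' x', x', y')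

def generate_walk (bits : String) (width : Int) (height : Int) :
    List (List Int) × (Int × Int) × (Int × Int) :=
  let bl := bits.toList
  let grid := (PySem.List.pyRange 0 height 1).map
      (fun _ => (PySem.List.pyRange 0 width 1).map (fun _ => (0 : Int)))
  let x := PySem.Int.floordiv width 2
  let y := PySem.Int.floordiv height 2
  let r := pvLoopA bl width height (PySem.List.pyRange 0 (bl.length : Int) 2) (grid, x, y)
  (r.1, (x, y), r.2)

-- ===== PORT B =====
-- deltas = [moves[bits[i:i+2]] for i in range(0, len(bits) - 1, 2)]
def pvDeltas (bl : List Char) : List (Int × Int) :=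
  (PySem.List.pyRange 0 ((bl.length : Int) - 1) 2).map
    (fun i => pvMoves.getD (String.ofList (PySem.List.slice bl (some i) (some (i + 2)))) (0, 0))

-- the walk loop recording each clamped position; state (x, y, path)
def pvWalkB (width height : Int) :
    List (Int × Int) → Int × Int × List (Int × Int) → Int × Int × List (Int × Int)
  | [], st => st
  | d :: rest, st =>
    let x' := max 0 (min (width - 1) (st.1 + d.1))
    let y' := max 0 (min (height - 1) (st.2.1 + d.2))
    pvWalkB width height rest (x', y', st.2.2 ++ [(x', y')])

def generate_walk_alt (bits : String) (width : Int) (height : Int) :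
    List (List Int) × (Int × Int) × (Int × Int) :=
  let bl := bits.toList
  let x := PySem.Int.floordiv width 2
  let y := PySem.Int.floordiv height 2
  let r := pvWalkB width height (pvDeltas bl) (x, y, [])
  let counts := r.2.2.foldl (fun d p => d.insert p (d.getD p 0 + 1)) PySem.Dict.empty
  let grid := (PySem.List.pyRange 0 height 1).map
      (fun cy => (PySem.List.pyRange 0 width 1).map (fun cx => counts.getD (cx, cy) 0))
  (grid, (x, y), (r.2.2.getLast?).getD (x, y))

-- ===== PRECONDITION & SPEC =====
-- Pre_ excludes exactly the inputs where A raises: a KeyError when some FULL bit pair contains a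
-- character other than '0'/'1' (a trailing odd character is never looked up), and an IndexError when
-- at least one full pair exists but the grid has no cells (width ≤ 0 or height ≤ 0).
def Pre_generate_walk (bits : String) (width : Int) (height : Int) : Prop :=
  ((bits.toList.take (2 * (bits.toList.length / 2))).all (fun c => c == '0' || c == '1')) = true
  ∧ (2 ≤ bits.toList.length → 1 ≤ width ∧ 1 ≤ height)
instance (bits : String) (width : Int) (height : Int) : Decidable (Pre_generate_walk bits width height) := by
  unfold Pre_generate_walk; infer_instance

def pvWitness_generate_walk : String × Int × Int := ("0011", 3, 3)


def Spec_generate_walk (bits : String) (width : Int) (height : Int)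
    (out : List (List Int) × (Int × Int) × (Int × Int)) : Prop :=
  out = generate_walk_alt bits width height
instance (bits : String) (width : Int) (height : Int) (out : List (List Int) × (Int × Int) × (Int × Int)) :
    Decidable (Spec_generate_walk bits width height out) := by unfold Spec_generate_walk; infer_instance

-- ===== CLAIM (what is proved, stated in full; the proofs are below) =====
def Claim_equal_generate_walk : Prop := ∀ (bits : String) (width : Int) (height : Int), Dom_generate_walk bits width height → Pre_generate_walk bits width height → Spec_generate_walk bits width height (generate_walk bits width height)

-- ===== LEMMAS AND PROOFS =====

-- A's loop body without the break (only full pairs reach it)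
def pvFoldSteps (width height : Int) :
    List (Int × Int) → List (List Int) × Int × Int → List (List Int) × Int × Int
  | [], st => st
  | d :: rest, st =>
    let x' := max 0 (min (width - 1) (st.2.1 + d.1))
    let y' := max 0 (min (height - 1) (st.2.2 + d.2))
    pvFoldSteps width height rest (pvGridInc st.1 y' x', x', y')

theorem pv_slice_len (bl : List Char) (i : Int) (h0 : 0 ≤ i) (h2 : i.toNat + 2 ≤ bl.length) :
    (PySem.List.slice bl (some i) (some (i + 2))).length = 2 := by
  rw [PySem.List.slice_toNat bl h0 (by omega)]
  simp only [List.length_take, List.length_drop]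
  omega

theorem pvLoopA_full (bl : List Char) (w h : Int) (idxs tail : List Int)
    (hfull : ∀ i ∈ idxs, 0 ≤ i ∧ i.toNat + 2 ≤ bl.length) (st : List (List Int) × Int × Int) :
    pvLoopA bl w h (idxs ++ tail) st =
      pvLoopA bl w h tail
        (pvFoldSteps w h
          (idxs.map (fun i =>
            pvMoves.getD (String.ofList (PySem.List.slice bl (some i) (some (i + 2)))) (0, 0))) st) := by
  induction idxs generalizing st with
  | nil => simp [pvFoldSteps]
  | cons i rest ih =>
    have hlen : (PySem.List.slice bl (some i) (some (i + 2))).length = 2 :=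
      pv_slice_len bl i (hfull i (List.mem_cons_self)).1 (hfull i (List.mem_cons_self)).2
    simp only [List.cons_append, pvLoopA, hlen]
    rw [if_neg (by omega)]
    rw [ih (fun j hj => hfull j (List.mem_cons_of_mem i hj))]
    simp [pvFoldSteps]

theorem pvWalkB_path (w h : Int) (ds : List (Int × Int)) (x y : Int) (path : List (Int × Int)) :
    pvWalkB w h ds (x, y, path) =
      ((pvWalkB w h ds (x, y, [])).1, (pvWalkB w h ds (x, y, [])).2.1,
        path ++ (pvWalkB w h ds (x, y, [])).2.2) := by
  induction ds generalizing x y path with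
  | nil => simp [pvWalkB]
  | cons d rest ih =>
    simp only [pvWalkB, List.nil_append]
    rw [ih _ _ [_], ih]
    simp

theorem pvFoldSteps_eq_walk (w h : Int) (ds : List (Int × Int)) (grid : List (List Int)) (x y : Int) :
    pvFoldSteps w h ds (grid, x, y) =
      ((pvWalkB w h ds (x, y, [])).2.2.foldl (fun g q => pvGridInc g q.2 q.1) grid,
        (pvWalkB w h ds (x, y, [])).1, (pvWalkB w h ds (x, y, [])).2.1) := by
  induction ds generalizing grid x y with
  | nil => simp [pvFoldSteps, pvWalkB]
  | cons d rest ih =>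
    simp only [pvFoldSteps, pvWalkB, List.nil_append]
    rw [ih, pvWalkB_path w h rest _ _ [_]]
    simp

theorem pv_lastD_cons {α : Type} (a z : α) (l : List α) :
    ((a :: l).getLast?).getD z = (l.getLast?).getD a := by
  induction l generalizing a z with
  | nil => simp
  | cons b t ih =>
    rw [List.getLast?_cons_cons, ih b a, ih b z]

theorem pvWalkB_last (w h : Int) (ds : List (Int × Int)) (x y : Int) :
    ((pvWalkB w h ds (x, y, [])).2.2.getLast?).getD (x, y) =
      ((pvWalkB w h ds (x, y, [])).1, (pvWalkB w h ds (x, y, [])).2.1) := by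
  induction ds generalizing x y with
  | nil => simp [pvWalkB]
  | cons d rest ih =>
    simp only [pvWalkB, List.nil_append]
    rw [pvWalkB_path w h rest _ _ [_]]
    simp only [List.cons_append, List.nil_append]
    rw [pv_lastD_cons]
    exact ih _ _

theorem pvWalkB_mem (w h : Int) (hw : 1 ≤ w) (hh : 1 ≤ h) (ds : List (Int × Int)) (x y : Int) :
    ∀ q ∈ (pvWalkB w h ds (x, y, [])).2.2, 0 ≤ q.1 ∧ q.1 < w ∧ 0 ≤ q.2 ∧ q.2 < h := by
  induction ds generalizing x y with
  | nil => simp [pvWalkB]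
  | cons d rest ih =>
    intro q hq
    simp only [pvWalkB, List.nil_append] at hq
    rw [pvWalkB_path w h rest _ _ [_]] at hq
    simp only [List.cons_append, List.nil_append, List.mem_cons] at hq
    rcases hq with rfl | hq
    · refine ⟨?_, ?_, ?_, ?_⟩ <;> simp <;> omega
    · exact ih _ _ q hq

theorem pvGridInc_map (w h x y : Int) (hx0 : 0 ≤ x) (hy0 : 0 ≤ y)
    (f : Int → Int → Int) :
    pvGridInc ((PySem.List.pyRange 0 h 1).map
        (fun cy => (PySem.List.pyRange 0 w 1).map (fun cx => f cx cy))) y x =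
      (PySem.List.pyRange 0 h 1).map
        (fun cy => (PySem.List.pyRange 0 w 1).map
          (fun cx => if cx = x ∧ cy = y then f cx cy + 1 else f cx cy)) := by
  unfold pvGridInc
  apply List.ext_getElem
  · simp
  intro j hj1 hj2
  rw [List.getElem_modify]
  simp only [List.getElem_map, PySem.List.getElem_pyRange_one]
  by_cases hcase : y.toNat = j
  · rw [if_pos hcase]
    apply List.ext_getElem
    · simp
    intro i hi1 hi2
    rw [List.getElem_modify]
    simp only [List.getElem_map, PySem.List.getElem_pyRange_one]
    have hy : (0 : Int) + (j : Int) = y := by omega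
    by_cases hx : x.toNat = i
    · have hxi : (0 : Int) + (i : Int) = x := by omega
      rw [if_pos hx, if_pos ⟨hxi, hy⟩]
    · have hxi : ¬ ((0 : Int) + (i : Int) = x) := by omega
      rw [if_neg hx, if_neg (by tauto)]
  · rw [if_neg hcase]
    have hy : ¬ ((0 : Int) + (j : Int) = y) := by omega
    apply List.map_congr_left
    intro cx _
    rw [if_neg (by tauto)]

theorem pvFoldInc_counts (w h : Int) (tr : List (Int × Int))
    (hmem : ∀ q ∈ tr, 0 ≤ q.1 ∧ q.1 < w ∧ 0 ≤ q.2 ∧ q.2 < h) (f : Int → Int → Int) :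
    tr.foldl (fun g q => pvGridInc g q.2 q.1)
        ((PySem.List.pyRange 0 h 1).map
          (fun cy => (PySem.List.pyRange 0 w 1).map (fun cx => f cx cy))) =
      (PySem.List.pyRange 0 h 1).map
        (fun cy => (PySem.List.pyRange 0 w 1).map
          (fun cx => f cx cy + (tr.count (cx, cy) : Int))) := by
  induction tr generalizing f with
  | nil => simp
  | cons q tr' ih =>
    have hq := hmem q List.mem_cons_self
    rw [List.foldl_cons]
    show List.foldl _ (pvGridInc _ q.2 q.1) _ = _
    rw [pvGridInc_map w h q.1 q.2 hq.1 hq.2.2.1 f]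
    rw [ih (fun r hr => hmem r (List.mem_cons_of_mem _ hr))]
    apply List.map_congr_left
    intro cy _
    apply List.map_congr_left
    intro cx _
    rw [List.count_cons]
    by_cases hc : cx = q.1 ∧ cy = q.2
    · have he : (q == (cx, cy)) = true := by
        simp only [beq_iff_eq, Prod.ext_iff]; exact ⟨hc.1.symm, hc.2.symm⟩
      rw [if_pos hc, he]
      simp
      ring
    · have he : (q == (cx, cy)) = false := by
        simp only [beq_eq_false_iff_ne, ne_eq, Prod.ext_iff]
        intro hcc
        exact hc ⟨hcc.1.symm, hcc.2.symm⟩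
      rw [if_neg hc, he]
      simp

theorem pvRange_split (m : Nat) :
    PySem.List.pyRange 0 (m : Int) 2 =
      PySem.List.pyRange 0 ((m : Int) - 1) 2 ++
        (if m % 2 = 1 then [((m : Int) - 1)] else []) := by
  rw [PySem.List.pyRange_of_pos 0 (m : Int) (by norm_num),
    PySem.List.pyRange_of_pos 0 ((m : Int) - 1) (by norm_num)]
  by_cases hm : m % 2 = 1
  · rw [if_pos hm]
    have h1 : (if (0 : Int) < (m : Int) then (((m : Int) - 0 + 2 - 1) / 2).toNat else 0) = m / 2 + 1 := by
      split_ifs <;> omega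
    have h2 : (if (0 : Int) < (m : Int) - 1 then (((m : Int) - 1 - 0 + 2 - 1) / 2).toNat else 0) = m / 2 := by
      split_ifs <;> omega
    rw [h1, h2, List.range_succ, List.map_append, List.map_singleton]
    have h3 : (0 : Int) + 2 * ((m / 2 : Nat) : Int) = (m : Int) - 1 := by omega
    rw [h3]
  · rw [if_neg hm]
    have h12 : (if (0 : Int) < (m : Int) then (((m : Int) - 0 + 2 - 1) / 2).toNat else 0) =
        (if (0 : Int) < (m : Int) - 1 then (((m : Int) - 1 - 0 + 2 - 1) / 2).toNat else 0) := by
      split_ifs <;> omega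
    rw [h12, List.append_nil]

-- ===== VERDICT (by name: the statement is the Claim_ definition above) =====
theorem generate_walk_spec : Claim_equal_generate_walk := by
  unfold Claim_equal_generate_walk
  intro bits w h _ hpre
  unfold Spec_generate_walk generate_walk generate_walk_alt
  dsimp only
  rw [pvRange_split bits.toList.length]
  have hfull : ∀ i ∈ PySem.List.pyRange 0 ((bits.toList.length : Int) - 1) 2,
      0 ≤ i ∧ i.toNat + 2 ≤ bits.toList.length := by
    intro i hi
    rw [PySem.List.mem_pyRange_iff_of_pos (by norm_num)] at hi
    exact ⟨hi.1, by omega⟩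
  rw [pvLoopA_full bits.toList w h _ _ hfull]
  have hsteps : (PySem.List.pyRange 0 ((bits.toList.length : Int) - 1) 2).map
      (fun i => pvMoves.getD (String.ofList (PySem.List.slice bits.toList (some i) (some (i + 2)))) (0, 0)) =
      pvDeltas bits.toList := rfl
  rw [hsteps]
  have hA : pvLoopA bits.toList w h
      (if bits.toList.length % 2 = 1 then [((bits.toList.length : Int)) - 1] else [])
      (pvFoldSteps w h (pvDeltas bits.toList)
        ((PySem.List.pyRange 0 h 1).map (fun _ => (PySem.List.pyRange 0 w 1).map (fun _ => (0 : Int))),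
          PySem.Int.floordiv w 2, PySem.Int.floordiv h 2)) =
      pvFoldSteps w h (pvDeltas bits.toList)
        ((PySem.List.pyRange 0 h 1).map (fun _ => (PySem.List.pyRange 0 w 1).map (fun _ => (0 : Int))),
          PySem.Int.floordiv w 2, PySem.Int.floordiv h 2) := by
    by_cases hm : bits.toList.length % 2 = 1
    · rw [if_pos hm]
      have hlen : (PySem.List.slice bits.toList (some ((bits.toList.length : Int) - 1))
          (some ((bits.toList.length : Int) - 1 + 2))).length = 1 := by
        rw [PySem.List.slice_toNat bits.toList (by omega) (by omega)]
        simp only [List.length_take, List.length_drop]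
        omega
      simp only [pvLoopA, hlen]
      rw [if_pos (by omega)]
    · rw [if_neg hm]
      rfl
  rw [hA, pvFoldSteps_eq_walk]
  have hmem : ∀ q ∈ (pvWalkB w h (pvDeltas bits.toList)
      (PySem.Int.floordiv w 2, PySem.Int.floordiv h 2, [])).2.2,
      0 ≤ q.1 ∧ q.1 < w ∧ 0 ≤ q.2 ∧ q.2 < h := by
    by_cases h2 : 2 ≤ bits.toList.length
    · exact pvWalkB_mem w h (hpre.2 h2).1 (hpre.2 h2).2 _ _ _
    · have hd : pvDeltas bits.toList = [] := by
        unfold pvDeltas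
        rw [PySem.List.pyRange_of_pos 0 _ (by norm_num), if_neg (by omega)]
        simp
      rw [hd]
      simp [pvWalkB]
  rw [show ((PySem.List.pyRange 0 h 1).map (fun _ => (PySem.List.pyRange 0 w 1).map (fun _ => (0 : Int)))) =
      ((PySem.List.pyRange 0 h 1).map (fun cy => (PySem.List.pyRange 0 w 1).map
        (fun cx => (fun (_ _ : Int) => (0 : Int)) cx cy))) from rfl]
  rw [pvFoldInc_counts w h _ hmem (fun _ _ => 0)]
  rw [pvWalkB_last]
  simp only [PySem.Dict.getD_foldl_insert_add_one, PySem.Dict.getD_empty]
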